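-- pv_equiv track=rewrite | github.com/grapheneaffiliate/h4-polytopic-attention | solve_arc_b22.py | solve_d9fac9be
-- ===== SOURCE A (Python) =====
-- def solve_d9fac9be(grid):
--     """Find the color inside the bordered box. The box is made of one color,
--     and contains a different color inside. Output that contained color."""
--     R, C = len(grid), len(grid[0])
--
--     # Find rectangular frames (3x3 blocks of one color with a different color in center)
--     from collections import defaultdict
--
--     # Look for a bordered region
--     for r in range(R - 2):
--         for c in range(C - 2):
--             # Check for 3x3 frame
--             border_color = grid[r][c]
--             if border_color == 0:
--                 continue
--             # Check all border cells
--             border_cells = [(r,c),(r,c+1),(r,c+2),(r+1,c),(r+1,c+2),(r+2,c),(r+2,c+1),(r+2,c+2)]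
--             if all(grid[br][bc] == border_color for br, bc in border_cells):
--                 center = grid[r+1][c+1]
--                 if center != 0 and center != border_color:
--                     return [[center]]
--
--     # Try larger frames
--     for r in range(R):
--         for c in range(C):
--             if grid[r][c] == 0:
--                 continue
--             border_color = grid[r][c]
--             # Try to find a rectangle of this color
--             # Find extent
--             for r2 in range(r + 2, R):
--                 for c2 in range(c + 2, C):
--                     # Check if (r,c)-(r2,c2) forms a frame of border_color
--                     valid = True
--                     # Top and bottom edges
--                     for cc in range(c, c2 + 1):
--                         if grid[r][cc] != border_color or grid[r2][cc] != border_color: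
--                             valid = False
--                             break
--                     if not valid:
--                         continue
--                     # Left and right edges
--                     for rr in range(r, r2 + 1):
--                         if grid[rr][c] != border_color or grid[rr][c2] != border_color:
--                             valid = False
--                             break
--                     if not valid:
--                         continue
--                     # Check interior has a different non-zero color
--                     for rr in range(r + 1, r2):
--                         for cc in range(c + 1, c2):
--                             v = grid[rr][cc]
--                             if v != 0 and v != border_color:
--                                 return [[v]]
--
--     return [[0]]
-- ===== SOURCE B (Python) =====
-- def _runs(vals):
--     # run length of equal consecutive values starting at each index, built right-to-left
--     n = len(vals)
--     out = [0] * n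
--     for i in range(n - 1, -1, -1):
--         if i + 1 < n and vals[i] == vals[i + 1]:
--             out[i] = out[i + 1] + 1
--         else:
--             out[i] = 1
--     return out
--
--
-- def solve_d9fac9be(grid):
--     """Find the color inside the bordered box, using precomputed horizontal and
--     vertical run-length tables so every frame edge is validated in O(1)."""
--     R, C = len(grid), len(grid[0])
--     right = [_runs(row) for row in grid]
--     downT = [_runs([grid[r][c] for r in range(R)]) for c in range(C)]
--
--     def frame_ok(r, c, r2, c2):
--         w, h = c2 - c + 1, r2 - r + 1
--         return (right[r][c] >= w and downT[c][r] >= h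
--                 and right[r2][c] >= w and downT[c2][r] >= h)
--
--     # 3x3 frames first (same scan order as the specification's first pass)
--     for r in range(R - 2):
--         for c in range(C - 2):
--             bc = grid[r][c]
--             if bc != 0 and frame_ok(r, c, r + 2, c + 2):
--                 center = grid[r + 1][c + 1]
--                 if center != 0 and center != bc:
--                     return [[center]]
--
--     # larger frames
--     for r in range(R):
--         for c in range(C):
--             bc = grid[r][c]
--             if bc == 0:
--                 continue
--             for r2 in range(r + 2, R):
--                 for c2 in range(c + 2, C):
--                     if frame_ok(r, c, r2, c2):
--                         for rr in range(r + 1, r2):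
--                             for cc in range(c + 1, c2):
--                                 v = grid[rr][cc]
--                                 if v != 0 and v != bc:
--                                     return [[v]]
--     return [[0]]
-- ===== Notes on version B (the rewrite author's own statement) =====
-- stated objective: alternative
-- what changed: A re-scans every candidate frame's four edges cell by cell; B precomputes horizontal and vertical run-length tables once and validates each frame edge with four O(1) table lookups, keeping A's scan order.
-- outside the precondition, e.g. on solve_d9fac9be([[1, 1, 1], [1, 2, 1], [1, 1, 1], [1]]): A returns [[2]], B raises IndexError
import Mathlib
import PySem

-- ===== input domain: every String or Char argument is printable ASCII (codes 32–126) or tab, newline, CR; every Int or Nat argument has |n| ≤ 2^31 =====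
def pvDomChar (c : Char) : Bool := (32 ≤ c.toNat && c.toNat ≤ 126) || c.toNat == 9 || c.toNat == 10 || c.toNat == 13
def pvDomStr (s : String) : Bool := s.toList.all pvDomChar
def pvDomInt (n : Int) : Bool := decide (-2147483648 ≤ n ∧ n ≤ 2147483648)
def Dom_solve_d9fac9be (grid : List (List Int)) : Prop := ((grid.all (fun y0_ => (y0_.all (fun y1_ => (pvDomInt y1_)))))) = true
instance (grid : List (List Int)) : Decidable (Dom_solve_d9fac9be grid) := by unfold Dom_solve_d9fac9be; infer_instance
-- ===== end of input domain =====

-- B replaces A's O(R+C) per-frame edge scans by precomputed horizontal/vertical run-length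
-- tables queried in O(1) per candidate frame (objective: alternative algorithm; equivalence
-- is proved on nonempty rectangular grids, where the Python programs return normally).

-- total 2-d lookup grid[r][c] (both Pythons only index in range on inputs admitted by Pre_)
def at2 (g : List (List Int)) (r c : Int) : Int :=
  PySem.List.pyGetD (PySem.List.pyGetD g r []) c 0

-- ===== PORT A =====
-- A's first scan: 3x3 frames, returning the first enclosed differing color
def pass1A (grid : List (List Int)) : Option (List (List Int)) :=
  (PySem.List.pyRange 0 ((grid.length : Int) - 2) 1).findSome? (fun r =>
    (PySem.List.pyRange 0 (((PySem.List.pyGetD grid 0 []).length : Int) - 2) 1).findSome? (fun c =>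
      let bc := at2 grid r c
      if bc = 0 then none
      else if ([(r,c),(r,c+1),(r,c+2),(r+1,c),(r+1,c+2),(r+2,c),(r+2,c+1),(r+2,c+2)].all
                 (fun p => at2 grid p.1 p.2 == bc)) then
        let center := at2 grid (r+1) (c+1)
        if center ≠ 0 ∧ center ≠ bc then some [[center]] else none
      else none))

-- A's second scan: arbitrary frames, edges re-scanned cell by cell
def pass2A (grid : List (List Int)) : Option (List (List Int)) :=
  (PySem.List.pyRange 0 (grid.length : Int) 1).findSome? (fun r =>
    (PySem.List.pyRange 0 ((PySem.List.pyGetD grid 0 []).length : Int) 1).findSome? (fun c =>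
      if at2 grid r c = 0 then none
      else
        let bc := at2 grid r c
        (PySem.List.pyRange (r+2) (grid.length : Int) 1).findSome? (fun r2 =>
          (PySem.List.pyRange (c+2) ((PySem.List.pyGetD grid 0 []).length : Int) 1).findSome? (fun c2 =>
            if (PySem.List.pyRange c (c2+1) 1).all
                 (fun cc => at2 grid r cc == bc && at2 grid r2 cc == bc) then
              if (PySem.List.pyRange r (r2+1) 1).all
                   (fun rr => at2 grid rr c == bc && at2 grid rr c2 == bc) then
                (PySem.List.pyRange (r+1) r2 1).findSome? (fun rr =>
                  (PySem.List.pyRange (c+1) c2 1).findSome? (fun cc =>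
                    let v := at2 grid rr cc
                    if v ≠ 0 ∧ v ≠ bc then some [[v]] else none))
              else none
            else none))))

def solve_d9fac9be (grid : List (List Int)) : List (List Int) :=
  match pass1A grid with
  | some ans => ans
  | none => (pass2A grid).getD [[0]]

-- ===== PORT B =====
-- run length of equal consecutive values starting at each index (Source B's _runs, built right-to-left)
def runsB : List Int → List Int
  | [] => []
  | [_] => [1]
  | x :: y :: rest =>
    (if x = y then (runsB (y :: rest)).headD 0 + 1 else 1) :: runsB (y :: rest)

def rowRuns (grid : List (List Int)) : List (List Int) := grid.map runsB

def colRuns (grid : List (List Int)) : List (List Int) :=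
  (PySem.List.pyRange 0 ((PySem.List.pyGetD grid 0 []).length : Int) 1).map (fun c =>
    runsB ((PySem.List.pyRange 0 (grid.length : Int) 1).map (fun r => at2 grid r c)))

-- Source B's frame_ok: all four frame edges validated by O(1) run-table lookups
def frameOk (grid : List (List Int)) (r c r2 c2 : Int) : Bool :=
  let w := c2 - c + 1
  let h := r2 - r + 1
  decide (w ≤ at2 (rowRuns grid) r c) && decide (h ≤ at2 (colRuns grid) c r) &&
  decide (w ≤ at2 (rowRuns grid) r2 c) && decide (h ≤ at2 (colRuns grid) c2 r)

-- Source B's first scan: 3x3 frames validated through frame_ok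
def pass1B (grid : List (List Int)) : Option (List (List Int)) :=
  (PySem.List.pyRange 0 ((grid.length : Int) - 2) 1).findSome? (fun r =>
    (PySem.List.pyRange 0 (((PySem.List.pyGetD grid 0 []).length : Int) - 2) 1).findSome? (fun c =>
      let bc := at2 grid r c
      if bc ≠ 0 && frameOk grid r c (r+2) (c+2) then
        let center := at2 grid (r+1) (c+1)
        if center ≠ 0 ∧ center ≠ bc then some [[center]] else none
      else none))

-- Source B's second scan: arbitrary frames validated through frame_ok
def pass2B (grid : List (List Int)) : Option (List (List Int)) :=
  (PySem.List.pyRange 0 (grid.length : Int) 1).findSome? (fun r =>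
    (PySem.List.pyRange 0 ((PySem.List.pyGetD grid 0 []).length : Int) 1).findSome? (fun c =>
      let bc := at2 grid r c
      if bc = 0 then none
      else
        (PySem.List.pyRange (r+2) (grid.length : Int) 1).findSome? (fun r2 =>
          (PySem.List.pyRange (c+2) ((PySem.List.pyGetD grid 0 []).length : Int) 1).findSome? (fun c2 =>
            if frameOk grid r c r2 c2 then
              (PySem.List.pyRange (r+1) r2 1).findSome? (fun rr =>
                (PySem.List.pyRange (c+1) c2 1).findSome? (fun cc =>
                  let v := at2 grid rr cc
                  if v ≠ 0 ∧ v ≠ bc then some [[v]] else none))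
            else none))))

def solve_d9fac9be_alt (grid : List (List Int)) : List (List Int) :=
  match pass1B grid with
  | some ans => ans
  | none => (pass2B grid).getD [[0]]

-- ===== PRECONDITION & SPEC =====
-- Pre_ excludes the empty grid (both Pythons raise IndexError on grid[0]) and grids with
-- a row shorter than row 0, on which the programs' full-grid scans in general raise
-- IndexError (A can still return on a few such grids by finding a frame before reaching
-- the short row, but B's column precomputation raises there).
def Pre_solve_d9fac9be (grid : List (List Int)) : Prop :=
  grid ≠ [] ∧ ∀ row ∈ grid, (PySem.List.pyGetD grid 0 []).length ≤ row.length
instance (grid : List (List Int)) : Decidable (Pre_solve_d9fac9be grid) := by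
  unfold Pre_solve_d9fac9be; infer_instance

def pvWitness_solve_d9fac9be : List (List Int) := [[1,1,1],[1,2,1],[1,1,1]]

def Spec_solve_d9fac9be (grid : List (List Int)) (out : List (List Int)) : Prop :=
  out = solve_d9fac9be_alt grid
instance (grid : List (List Int)) (out : List (List Int)) : Decidable (Spec_solve_d9fac9be grid out) := by
  unfold Spec_solve_d9fac9be; infer_instance

-- ===== CLAIM (what is proved, stated in full; the proofs are below) =====
def Claim_equal_solve_d9fac9be : Prop :=
  ∀ (grid : List (List Int)), Dom_solve_d9fac9be grid → Pre_solve_d9fac9be grid →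
    Spec_solve_d9fac9be grid (solve_d9fac9be grid)

-- ===== LEMMAS AND PROOFS =====

theorem findSome?_congr {α β : Type} (l : List α) (f g : α → Option β)
    (h : ∀ a ∈ l, f a = g a) : l.findSome? f = l.findSome? g := by
  induction l with
  | nil => rfl
  | cons a t ih =>
    simp only [List.findSome?_cons, h a (by simp)]
    cases g a with
    | some _ => rfl
    | none => exact ih (fun x hx => h x (by simp [hx]))

@[simp] theorem runsB_length (l : List Int) : (runsB l).length = l.length := by
  induction l using runsB.induct with
  | case1 => rfl
  | case2 => rfl
  | case3 x y rest ih => simp [runsB, ih]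

theorem runs_ge_nat (l : List Int) (i k : Nat) (hk : 1 ≤ k) (hik : i + k ≤ l.length) :
    ((k : Int) ≤ (runsB l).getD i 0) ↔ ∀ j, j < k → l.getD (i + j) 0 = l.getD i 0 := by
  induction l using runsB.induct generalizing i k with
  | case1 => simp at hik; omega
  | case2 x =>
    simp only [List.length_singleton] at hik
    have hi : i = 0 := by omega
    have hk1 : k = 1 := by omega
    subst hi; subst hk1
    simp [runsB]
  | case3 x y rest ih =>
    cases i with
    | succ i' =>
      have ih' := ih i' k hk (by simp at hik ⊢; omega)
      simp only [runsB, List.getD_cons_succ]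
      rw [ih']
      constructor
      · intro h j hj
        rw [show i' + 1 + j = (i' + j) + 1 by omega]
        simpa using h j hj
      · intro h j hj
        have := h j hj
        rw [show i' + 1 + j = (i' + j) + 1 by omega] at this
        simpa using this
    | zero =>
      have hhead : (runsB (y :: rest)).headD 0 = (runsB (y :: rest)).getD 0 0 := by
        cases h : runsB (y :: rest) with
        | nil => simp
        | cons a t => simp
      by_cases hx : x = y
      · subst hx
        rcases Nat.lt_or_ge k 2 with hk2 | hk2
        · have hk1 : k = 1 := by omega
          subst hk1
          have h1 : ((1:Int) ≤ (runsB (x :: rest)).getD 0 0) := by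
            have harg : (0:Nat) + 1 ≤ (x :: rest).length := by simp
            have hall : ∀ j, j < 1 → (x :: rest).getD (0 + j) 0 = (x :: rest).getD 0 0 := by
              intro j hj
              obtain rfl : j = 0 := by omega
              norm_num
            have := (ih 0 1 le_rfl harg).mpr hall
            exact_mod_cast this
          constructor
          · intro _ j hj
            have : j = 0 := by omega
            simp [this]
          · intro _
            simp only [runsB, List.getD_cons_zero]
            push_cast
            omega
        · -- k ≥ 2
          have hrec := ih 0 (k - 1) (by omega) (by simp at hik ⊢; omega)
          constructor
          · intro h j hj
            simp only [runsB, List.getD_cons_zero] at h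
            have h' : ((k - 1 : Nat) : Int) ≤ (runsB (x :: rest)).getD 0 0 := by
              push_cast at h ⊢; omega
            have hall := hrec.mp h'
            cases j with
            | zero => rfl
            | succ j' =>
              have := hall j' (by omega)
              simpa using this
          · intro hall
            simp only [runsB, List.getD_cons_zero]
            have h' : ∀ j, j < k - 1 → (x :: rest).getD (0 + j) 0 = (x :: rest).getD 0 0 := by
              intro j hj
              have h1 := hall (j + 1) (by omega)
              simpa using h1
            have := hrec.mpr h'
            push_cast at this ⊢
            omega
      · -- x ≠ y
        rcases Nat.lt_or_ge k 2 with hk2 | hk2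
        · have hk1 : k = 1 := by omega
          subst hk1
          simp only [runsB, if_neg hx, List.getD_cons_zero]
          constructor
          · intro _ j hj
            have : j = 0 := by omega
            simp [this]
          · intro _; norm_num
        · simp only [runsB, if_neg hx, List.getD_cons_zero]
          constructor
          · intro h; push_cast at h; omega
          · intro hall
            have h1 := hall 1 (by omega)
            simp at h1
            exact absurd h1.symm hx

theorem runs_ge_int (l : List Int) (i k : Int) (hi : 0 ≤ i) (hk : 1 ≤ k)
    (hik : i + k ≤ (l.length : Int)) :
    (k ≤ PySem.List.pyGetD (runsB l) i 0) ↔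
      ∀ j : Int, i ≤ j → j < i + k →
        PySem.List.pyGetD l j 0 = PySem.List.pyGetD l i 0 := by
  obtain ⟨iN, rfl⟩ := Int.eq_ofNat_of_zero_le hi
  obtain ⟨kN, rfl⟩ := Int.eq_ofNat_of_zero_le (le_trans zero_le_one hk)
  rw [PySem.List.pyGetD_natCast, PySem.List.pyGetD_natCast,
    runs_ge_nat l iN kN (by exact_mod_cast hk) (by exact_mod_cast hik)]
  constructor
  · intro h j hj1 hj2
    obtain ⟨jN, rfl⟩ := Int.eq_ofNat_of_zero_le (le_trans (by exact_mod_cast Int.natCast_nonneg iN) hj1)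
    rw [PySem.List.pyGetD_natCast]
    have hje : jN = iN + (jN - iN) := by omega
    rw [hje]
    exact h (jN - iN) (by omega)
  · intro h j hj
    have := h ((iN + j : Nat) : Int) (by push_cast; omega) (by push_cast; omega)
    rwa [PySem.List.pyGetD_natCast] at this

theorem row_len_ge (grid : List (List Int)) (hpre : Pre_solve_d9fac9be grid) (r : Int)
    (h0 : 0 ≤ r) (hR : r < (grid.length : Int)) :
    ((PySem.List.pyGetD grid 0 []).length : Int) ≤ ((PySem.List.pyGetD grid r []).length : Int) := by
  have hm : PySem.List.pyGetD grid r [] ∈ grid :=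
    PySem.List.pyGetD_mem grid [] ⟨by omega, hR⟩
  exact_mod_cast hpre.2 _ hm

theorem at2_rowRuns (grid : List (List Int)) (r c : Int)
    (h0 : 0 ≤ r) (hR : r < (grid.length : Int)) :
    at2 (rowRuns grid) r c = PySem.List.pyGetD (runsB (PySem.List.pyGetD grid r [])) c 0 := by
  unfold at2 rowRuns
  rw [PySem.List.pyGetD_eq_getElem (grid.map runsB) [] h0 (by simpa using hR),
      PySem.List.pyGetD_eq_getElem grid [] h0 hR, List.getElem_map]

-- the column list Source B builds for column c
def colList (grid : List (List Int)) (c : Int) : List Int :=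
  (PySem.List.pyRange 0 (grid.length : Int) 1).map (fun r => at2 grid r c)

theorem at2_colRuns (grid : List (List Int)) (r c : Int)
    (h0 : 0 ≤ c) (hC : c < ((PySem.List.pyGetD grid 0 []).length : Int)) :
    at2 (colRuns grid) c r = PySem.List.pyGetD (runsB (colList grid c)) r 0 := by
  unfold at2 colRuns colList
  rw [PySem.List.pyGetD_map_pyRange_of_nonneg _ _ _ _ h0 hC]

theorem colList_get (grid : List (List Int)) (c j : Int)
    (h0 : 0 ≤ j) (hR : j < (grid.length : Int)) :
    PySem.List.pyGetD (colList grid c) j 0 = at2 grid j c := by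
  unfold colList
  rw [PySem.List.pyGetD_map_pyRange_of_nonneg _ _ _ _ h0 hR]

theorem colList_len (grid : List (List Int)) (c : Int) :
    ((colList grid c).length : Int) = (grid.length : Int) := by
  unfold colList
  simp [PySem.List.length_pyRange_one]

theorem seg_row (grid : List (List Int)) (hpre : Pre_solve_d9fac9be grid) (r c c2 : Int)
    (hr0 : 0 ≤ r) (hrR : r < (grid.length : Int))
    (hc0 : 0 ≤ c) (hcc : c ≤ c2) (hc2 : c2 < ((PySem.List.pyGetD grid 0 []).length : Int)) :
    (c2 - c + 1 ≤ at2 (rowRuns grid) r c) ↔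
      ∀ cc, c ≤ cc → cc < c2 + 1 → at2 grid r cc = at2 grid r c := by
  rw [at2_rowRuns grid r c hr0 hrR]
  have := runs_ge_int (PySem.List.pyGetD grid r []) c (c2 - c + 1) hc0 (by omega)
    (by have := row_len_ge grid hpre r hr0 hrR; omega)
  rw [show c + (c2 - c + 1) = c2 + 1 by ring] at this
  exact this

theorem seg_col (grid : List (List Int)) (_hpre : Pre_solve_d9fac9be grid) (c r r2 : Int)
    (hc0 : 0 ≤ c) (hcC : c < ((PySem.List.pyGetD grid 0 []).length : Int))
    (hr0 : 0 ≤ r) (hrr : r ≤ r2) (hr2 : r2 < (grid.length : Int)) :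
    (r2 - r + 1 ≤ at2 (colRuns grid) c r) ↔
      ∀ rr, r ≤ rr → rr < r2 + 1 → at2 grid rr c = at2 grid r c := by
  rw [at2_colRuns grid r c hc0 hcC]
  have h := runs_ge_int (colList grid c) r (r2 - r + 1) hr0 (by omega)
    (by rw [colList_len]; omega)
  rw [show r + (r2 - r + 1) = r2 + 1 by ring] at h
  rw [h, colList_get grid c r hr0 (by omega)]
  constructor
  · intro hall rr h1 h2
    rw [← colList_get grid c rr (by omega) (by omega)]
    exact hall rr h1 h2
  · intro hall j h1 h2
    rw [colList_get grid c j (by omega) (by omega)]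
    exact hall j h1 h2

theorem frame_iff (grid : List (List Int)) (hpre : Pre_solve_d9fac9be grid) (r c r2 c2 : Int)
    (hr0 : 0 ≤ r) (hr2 : r + 2 ≤ r2) (hrR : r2 < (grid.length : Int))
    (hc0 : 0 ≤ c) (hc2 : c + 2 ≤ c2) (hcC : c2 < ((PySem.List.pyGetD grid 0 []).length : Int)) :
    frameOk grid r c r2 c2 = true ↔
      ((∀ cc, c ≤ cc → cc < c2 + 1 →
          at2 grid r cc = at2 grid r c ∧ at2 grid r2 cc = at2 grid r c) ∧
       (∀ rr, r ≤ rr → rr < r2 + 1 →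
          at2 grid rr c = at2 grid r c ∧ at2 grid rr c2 = at2 grid r c)) := by
  simp only [frameOk, Bool.and_eq_true, decide_eq_true_eq]
  rw [seg_row grid hpre r c c2 hr0 (by omega) hc0 (by omega) hcC,
      seg_row grid hpre r2 c c2 (by omega) hrR hc0 (by omega) hcC,
      seg_col grid hpre c r r2 hc0 (by omega) hr0 (by omega) hrR,
      seg_col grid hpre c2 r r2 (by omega) hcC hr0 (by omega) hrR]
  constructor
  · rintro ⟨⟨⟨t1, t2⟩, t3⟩, t4⟩
    have hb : at2 grid r2 c = at2 grid r c := t2 r2 (by omega) (by omega)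
    have hr' : at2 grid r c2 = at2 grid r c := t1 c2 (by omega) (by omega)
    exact ⟨fun cc h1 h2 => ⟨t1 cc h1 h2, (t3 cc h1 h2).trans hb⟩,
           fun rr h1 h2 => ⟨t2 rr h1 h2, (t4 rr h1 h2).trans hr'⟩⟩
  · rintro ⟨hTB, hLR⟩
    have hb : at2 grid r2 c = at2 grid r c := (hLR r2 (by omega) (by omega)).1
    have hr' : at2 grid r c2 = at2 grid r c := (hTB c2 (by omega) (by omega)).1
    refine ⟨⟨⟨fun cc h1 h2 => (hTB cc h1 h2).1, fun rr h1 h2 => (hLR rr h1 h2).1⟩, ?_⟩, ?_⟩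
    · intro cc h1 h2
      rw [(hTB cc h1 h2).2, hb]
    · intro rr h1 h2
      rw [(hLR rr h1 h2).2, hr']

-- A's two edge-scan `all`s agree with Source B's O(1) frame_ok, as Bools
theorem frame_eq_alls (grid : List (List Int)) (hpre : Pre_solve_d9fac9be grid) (r c r2 c2 : Int)
    (hr0 : 0 ≤ r) (hr2 : r + 2 ≤ r2) (hrR : r2 < (grid.length : Int))
    (hc0 : 0 ≤ c) (hc2 : c + 2 ≤ c2) (hcC : c2 < ((PySem.List.pyGetD grid 0 []).length : Int)) :
    frameOk grid r c r2 c2 =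
      ((PySem.List.pyRange c (c2+1) 1).all
          (fun cc => at2 grid r cc == at2 grid r c && at2 grid r2 cc == at2 grid r c) &&
       (PySem.List.pyRange r (r2+1) 1).all
          (fun rr => at2 grid rr c == at2 grid r c && at2 grid rr c2 == at2 grid r c)) := by
  apply Bool.coe_iff_coe.mp
  rw [frame_iff grid hpre r c r2 c2 hr0 hr2 hrR hc0 hc2 hcC]
  simp only [Bool.and_eq_true, List.all_eq_true, PySem.List.mem_pyRange_one,
    beq_iff_eq, and_imp]

-- Source B's frame_ok at a 3x3 frame agrees with A's 8-cell border check
theorem frame_eq_all8 (grid : List (List Int)) (hpre : Pre_solve_d9fac9be grid) (r c : Int)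
    (hr0 : 0 ≤ r) (hrR : r + 2 < (grid.length : Int))
    (hc0 : 0 ≤ c) (hcC : c + 2 < ((PySem.List.pyGetD grid 0 []).length : Int)) :
    frameOk grid r c (r+2) (c+2) =
      ([(r,c),(r,c+1),(r,c+2),(r+1,c),(r+1,c+2),(r+2,c),(r+2,c+1),(r+2,c+2)].all
         (fun p => at2 grid p.1 p.2 == at2 grid r c)) := by
  apply Bool.coe_iff_coe.mp
  rw [frame_iff grid hpre r c (r+2) (c+2) hr0 (by omega) hrR hc0 (by omega) hcC]
  simp only [List.all_cons, List.all_nil, Bool.and_eq_true, beq_iff_eq, Bool.and_true,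
    true_and]
  constructor
  · rintro ⟨hTB, hLR⟩
    exact ⟨(hTB (c+1) (by omega) (by omega)).1, (hTB (c+2) (by omega) (by omega)).1,
           (hLR (r+1) (by omega) (by omega)).1, (hLR (r+1) (by omega) (by omega)).2,
           (hTB c (by omega) (by omega)).2, (hTB (c+1) (by omega) (by omega)).2,
           (hTB (c+2) (by omega) (by omega)).2⟩
  · rintro ⟨e2, e3, e4, e5, e6, e7, e8⟩
    constructor
    · intro cc h1 h2
      have : cc = c ∨ cc = c + 1 ∨ cc = c + 2 := by omega
      rcases this with rfl | rfl | rfl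
      · exact ⟨rfl, e6⟩
      · exact ⟨e2, e7⟩
      · exact ⟨e3, e8⟩
    · intro rr h1 h2
      have : rr = r ∨ rr = r + 1 ∨ rr = r + 2 := by omega
      rcases this with rfl | rfl | rfl
      · exact ⟨rfl, e3⟩
      · exact ⟨e4, e5⟩
      · exact ⟨e6, e8⟩

-- ===== VERDICT (by name: the statement is the Claim_ definition above) =====
theorem solve_d9fac9be_spec : Claim_equal_solve_d9fac9be := by
  intro grid _ hpre
  unfold Spec_solve_d9fac9be solve_d9fac9be solve_d9fac9be_alt
  have hpass1 : pass1A grid = pass1B grid := by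
    unfold pass1A pass1B
    apply findSome?_congr
    intro r hr
    rw [PySem.List.mem_pyRange_one] at hr
    apply findSome?_congr
    intro c hc
    rw [PySem.List.mem_pyRange_one] at hc
    simp only
    by_cases hbc : at2 grid r c = 0
    · simp [hbc]
    · rw [frame_eq_all8 grid hpre r c hr.1 (by omega) hc.1 (by omega)]
      simp [hbc]
  have hpass2 : pass2A grid = pass2B grid := by
    unfold pass2A pass2B
    apply findSome?_congr
    intro r hr
    rw [PySem.List.mem_pyRange_one] at hr
    apply findSome?_congr
    intro c hc
    rw [PySem.List.mem_pyRange_one] at hc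
    simp only
    by_cases hbc : at2 grid r c = 0
    · simp [hbc]
    · rw [if_neg hbc, if_neg hbc]
      apply findSome?_congr
      intro r2 hr2
      rw [PySem.List.mem_pyRange_one] at hr2
      apply findSome?_congr
      intro c2 hc2
      rw [PySem.List.mem_pyRange_one] at hc2
      rw [frame_eq_alls grid hpre r c r2 c2 hr.1 hr2.1 hr2.2 hc.1 hc2.1 hc2.2]
      cases h1 : (PySem.List.pyRange c (c2+1) 1).all
          (fun cc => at2 grid r cc == at2 grid r c && at2 grid r2 cc == at2 grid r c) <;>
        cases h2 : (PySem.List.pyRange r (r2+1) 1).all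
          (fun rr => at2 grid rr c == at2 grid r c && at2 grid rr c2 == at2 grid r c) <;>
        simp
  rw [hpass1, hpass2]
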